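-- pv_equiv track=rewrite | github.com/AlifSrSE/ProblemSolves | sushiForTwo.py | longest_sushi_segment
-- ===== SOURCE A (Python) =====
-- def longest_sushi_segment(n, sushi_types):
--     max_length = 0
--     current_tuna = 0
--     current_eel = 0
--     prev_type = sushi_types[0]
--
--     for i in range(n):
--         if sushi_types[i] == 1:
--             if prev_type == 2:
--                 max_length = max(max_length, 2 * min(current_tuna, current_eel))
--                 current_tuna = 0
--             current_tuna += 1
--         else:
--             if prev_type == 1:
--                 max_length = max(max_length, 2 * min(current_tuna, current_eel))
--                 current_eel = 0
--             current_eel += 1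
--         prev_type = sushi_types[i]
--
--     max_length = max(max_length, 2 * min(current_tuna, current_eel))
--     return max_length
-- ===== SOURCE B (Python) =====
-- def longest_sushi_segment(n, sushi_types):
--     # Run-length encode the first n sushi types, then the answer is the best
--     # 2*min over the lengths of adjacent runs.
--     runs = []  # entries: [type, length]
--     for i in range(n):
--         x = sushi_types[i]
--         if runs and runs[-1][0] == x:
--             runs[-1][1] += 1
--         else:
--             runs.append([x, 1])
--     best = 0
--     prev_len = None
--     for _type, length in runs:
--         if prev_len is not None:
--             best = max(best, 2 * min(prev_len, length))
--         prev_len = length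
--     return best
-- ===== Notes on version B (the rewrite author's own statement) =====
-- stated objective: simpler
-- what changed: Replaced A's one-pass four-variable state machine with a plain two-pass decomposition (run-length encode the first n types by value, then take the best 2*min over adjacent run lengths); Pre_ excludes the empty list and n > len (A raises IndexError there) and prefixes containing values other than 1 or 2, malformed sushi types on which A's asymmetric reset (treat every non-1 as eel but reset tuna only after a 2) is an implementation artefact.
-- outside the precondition, e.g. on longest_sushi_segment(2, [2, 3]): A returns 0, B returns 2
import Mathlib
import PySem

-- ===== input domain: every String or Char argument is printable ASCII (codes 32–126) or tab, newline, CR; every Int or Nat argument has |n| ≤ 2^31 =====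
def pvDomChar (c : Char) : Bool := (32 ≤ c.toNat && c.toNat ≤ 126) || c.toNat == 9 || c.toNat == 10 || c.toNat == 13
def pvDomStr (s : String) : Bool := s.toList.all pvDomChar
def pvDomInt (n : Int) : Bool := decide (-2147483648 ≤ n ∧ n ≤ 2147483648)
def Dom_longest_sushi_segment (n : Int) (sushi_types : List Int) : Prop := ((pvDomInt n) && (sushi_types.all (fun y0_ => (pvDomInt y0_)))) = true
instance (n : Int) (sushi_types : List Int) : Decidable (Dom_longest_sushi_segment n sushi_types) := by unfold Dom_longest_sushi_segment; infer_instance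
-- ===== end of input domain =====

-- B replaces A's one-pass four-variable state machine by a plain two-pass decomposition
-- (run-length encode the first n types, then best 2*min over adjacent run lengths);
-- objective: simpler. Return-value equivalence only (neither mutates its input).

-- ===== PORT A =====
-- one loop step of A: x = sushi_types[i]; branch on x == 1 with prev_type checks
def pvStepA (s : Int × Int × Int × Int) (x : Int) : Int × Int × Int × Int :=
  match s with
  | (m, t, e, p) =>
    if x == 1 then
      if p == 2 then (max m (2 * min t e), 0 + 1, e, x) else (m, t + 1, e, x)
    else
      if p == 1 then (max m (2 * min t e), t, 0 + 1, x) else (m, t, e + 1, x)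

def longest_sushi_segment (n : Int) (sushi_types : List Int) : Int :=
  -- prev_type = sushi_types[0]: Python raises IndexError on the empty list (excluded by Pre_)
  match PySem.List.pyGet? sushi_types 0 with
  | none => 0
  | some p0 =>
    let s := (PySem.List.pyRange 0 n 1).foldl
      (fun s i => pvStepA s (PySem.List.pyGetD sushi_types i 0)) (0, 0, 0, p0)
    max s.1 (2 * min s.2.1 s.2.2.1)

-- ===== PORT B =====
-- pass-1 step of Source B: extend the last run or append a new one
-- (the run list is kept in reverse; it is reversed at the use site)
def pvStepR (r : List (Int × Int)) (x : Int) : List (Int × Int) :=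
  match r with
  | [] => [(x, 1)]
  | (v, l) :: rest => if v == x then (v, l + 1) :: rest else (x, 1) :: (v, l) :: rest

-- pass-2 step of Source B: best so far and prev_len (None before the first run)
def pvScan (s : Int × Option Int) (run : Int × Int) : Int × Option Int :=
  match s with
  | (best, none) => (best, some run.2)
  | (best, some pl) => (max best (2 * min pl run.2), some run.2)

def longest_sushi_segment_alt (n : Int) (sushi_types : List Int) : Int :=
  let revRuns := (PySem.List.pyRange 0 n 1).foldl
    (fun r i => pvStepR r (PySem.List.pyGetD sushi_types i 0)) []
  (revRuns.reverse.foldl pvScan (0, none)).1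

-- ===== PRECONDITION & SPEC =====
-- Pre_ excludes the empty list and n > len(sushi_types), on which A raises IndexError,
-- and prefixes containing values other than 1 or 2: malformed sushi types, on which A's
-- asymmetric reset (every non-1 counts as eel, yet tuna is reset only after a 2) is an
-- implementation artefact no caller would specify.
def Pre_longest_sushi_segment (n : Int) (sushi_types : List Int) : Prop :=
  sushi_types ≠ [] ∧ n ≤ (sushi_types.length : Int) ∧
  (sushi_types.take n.toNat).all (fun x => x == 1 || x == 2) = true
instance (n : Int) (sushi_types : List Int) : Decidable (Pre_longest_sushi_segment n sushi_types) := by unfold Pre_longest_sushi_segment; infer_instance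
def pvWitness_longest_sushi_segment : Int × List Int := (4, [1, 2, 2, 1])

def Spec_longest_sushi_segment (n : Int) (sushi_types : List Int) (out : Int) : Prop := out = longest_sushi_segment_alt n sushi_types
instance (n : Int) (sushi_types : List Int) (out : Int) : Decidable (Spec_longest_sushi_segment n sushi_types out) := by unfold Spec_longest_sushi_segment; infer_instance

-- ===== CLAIM (what is proved, stated in full; the proofs are below) =====
def Claim_equal_longest_sushi_segment : Prop := ∀ (n : Int) (sushi_types : List Int), Dom_longest_sushi_segment n sushi_types → Pre_longest_sushi_segment n sushi_types → Spec_longest_sushi_segment n sushi_types (longest_sushi_segment n sushi_types)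
-- ===== LEMMAS AND PROOFS =====

-- head length of the (reversed) run list, 0 when empty
def pvHeadLen : List (Int × Int) → Int
  | [] => 0
  | (_, l) :: _ => l

-- simulation invariant between A's running state (max, tuna, eel, prev) and
-- B's reversed run list, valid while all processed values lie in {1, 2}
def pvGood (s : Int × Int × Int × Int) (r : List (Int × Int)) : Prop :=
  ∃ l rest, r = (s.2.2.2, l) :: rest ∧
    (s.2.2.2 = 1 → s.2.1 = l ∧ s.2.2.1 = pvHeadLen rest) ∧
    (s.2.2.2 = 2 → s.2.2.1 = l ∧ s.2.1 = pvHeadLen rest) ∧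
    0 < l ∧ 0 ≤ pvHeadLen rest ∧
    rest.reverse.foldl pvScan (0, none) = (s.1, rest.head?.map (·.2)) ∧ 0 ≤ s.1

lemma pvGood_step (s : Int × Int × Int × Int) (r : List (Int × Int)) (x : Int)
    (hx : x = 1 ∨ x = 2) (hp : s.2.2.2 = 1 ∨ s.2.2.2 = 2)
    (h : pvGood s r) : pvGood (pvStepA s x) (pvStepR r x) := by
  obtain ⟨m, t, e, p⟩ := s
  obtain ⟨l, rest, hr, h1, h2, hl, hhl, hfold, hm⟩ := h
  subst hr
  simp only at h1 h2 hp hfold hm ⊢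
  by_cases hxe : x = p
  · -- extend the current run
    subst hxe
    rcases hp with hp | hp <;> subst hp <;>
      refine ⟨l + 1, rest, ?_, ?_, ?_, by omega, hhl, ?_, ?_⟩ <;>
      simp_all [pvStepA, pvStepR, pvHeadLen]
  · -- start a new run: the boundary pair (previous two runs) is folded into max
    have hfold' : ((p, l) :: rest).reverse.foldl pvScan (0, none)
        = (max m (2 * min t e), some l) := by
      rw [List.reverse_cons, List.foldl_append, hfold]
      cases rest with
      | nil =>
        simp only [List.head?] at *
        simp only [List.foldl_cons, List.foldl_nil, pvScan, Option.map]
        rcases hp with hp | hp <;> subst hp <;>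
          simp_all [pvHeadLen] <;> first | rfl | (congr 1; omega)
      | cons hd tl =>
        obtain ⟨hv, hlh⟩ := hd
        simp only [List.head?, Option.map] at *
        simp only [List.foldl_cons, List.foldl_nil, pvScan]
        rcases hp with hp | hp <;> subst hp <;> simp_all [pvHeadLen] <;>
          first | rfl | (congr 1; omega)
    rcases hx with hx | hx <;> rcases hp with hp | hp <;> subst hx <;> subst hp
    · exact absurd rfl hxe
    · -- x = 1 after an eel run (p = 2)
      refine ⟨1, (2, l) :: rest, ?_, ?_, ?_, by norm_num, by simp [pvHeadLen]; omega, ?_, ?_⟩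
      · simp [pvStepA, pvStepR]
      · simp [pvStepA, pvHeadLen]; omega
      · simp [pvStepA]
      · simp only [pvStepA]; simp only [Int.reduceBEq, if_true]
        simpa [pvHeadLen] using hfold'
      · simp [pvStepA]; omega
    · -- x = 2 after a tuna run (p = 1)
      refine ⟨1, (1, l) :: rest, ?_, ?_, ?_, by norm_num, by simp [pvHeadLen]; omega, ?_, ?_⟩
      · simp [pvStepA, pvStepR]
      · simp [pvStepA]
      · simp [pvStepA, pvHeadLen]; omega
      · simp only [pvStepA]; simp only [Int.reduceBEq, if_true]
        simpa [pvHeadLen] using hfold'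
      · simp [pvStepA]; omega
    · exact absurd rfl hxe

lemma pvGood_base (x : Int) (hx : x = 1 ∨ x = 2) :
    pvGood (pvStepA (0, 0, 0, x) x) (pvStepR [] x) := by
  rcases hx with hx | hx <;> subst hx <;>
    refine ⟨1, [], ?_, ?_, ?_, by norm_num, by simp [pvHeadLen], ?_, ?_⟩ <;>
    simp [pvStepA, pvStepR, pvHeadLen]

lemma pvStepA_prev (s : Int × Int × Int × Int) (x : Int) : (pvStepA s x).2.2.2 = x := by
  obtain ⟨m, t, e, p⟩ := s
  simp only [pvStepA]
  split_ifs <;> rfl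

-- the fold preserves the invariant along range(a, n), given all drawn values lie in {1, 2}
lemma pvGood_fold (st : List Int) (n : Int)
    (hmem : ∀ i : Int, 0 ≤ i → i < n →
      PySem.List.pyGetD st i 0 = 1 ∨ PySem.List.pyGetD st i 0 = 2) :
    ∀ (k : Nat) (a : Int), (n - a).toNat = k → 0 ≤ a →
    ∀ s r, pvGood s r → (s.2.2.2 = 1 ∨ s.2.2.2 = 2) →
      pvGood ((PySem.List.pyRange a n 1).foldl
                (fun s i => pvStepA s (PySem.List.pyGetD st i 0)) s)
             ((PySem.List.pyRange a n 1).foldl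
                (fun r i => pvStepR r (PySem.List.pyGetD st i 0)) r) := by
  intro k
  induction k with
  | zero =>
    intro a ha _ s r h _
    rw [PySem.List.pyRange_one_eq_nil (by omega)]
    simpa using h
  | succ k ih =>
    intro a ha ha0 s r h hp
    have hl : a < n := by omega
    rw [PySem.List.pyRange_one_cons hl]
    simp only [List.foldl_cons]
    have hx := hmem a ha0 hl
    exact ih (a + 1) (by omega) (by omega) _ _ (pvGood_step s r _ hx hp h)
      (by rw [pvStepA_prev]; exact hx)

-- the prev field after the fold stays in {1, 2}
lemma pvFold_prev (st : List Int) (n : Int)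
    (hmem : ∀ i : Int, 0 ≤ i → i < n →
      PySem.List.pyGetD st i 0 = 1 ∨ PySem.List.pyGetD st i 0 = 2) :
    ∀ (k : Nat) (a : Int), (n - a).toNat = k → 0 ≤ a →
    ∀ s : Int × Int × Int × Int, (s.2.2.2 = 1 ∨ s.2.2.2 = 2) →
      (((PySem.List.pyRange a n 1).foldl
          (fun s i => pvStepA s (PySem.List.pyGetD st i 0)) s).2.2.2 = 1 ∨
       ((PySem.List.pyRange a n 1).foldl
          (fun s i => pvStepA s (PySem.List.pyGetD st i 0)) s).2.2.2 = 2) := by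
  intro k
  induction k with
  | zero =>
    intro a ha _ s hs
    rw [PySem.List.pyRange_one_eq_nil (by omega)]
    simpa using hs
  | succ k ih =>
    intro a ha ha0 s hs
    have hla : a < n := by omega
    rw [PySem.List.pyRange_one_cons hla]
    simp only [List.foldl_cons]
    exact ih (a + 1) (by omega) (by omega) _ (by rw [pvStepA_prev]; exact hmem a ha0 hla)

-- the invariant yields equality of A's final value and B's pair scan
lemma pvFinal (s : Int × Int × Int × Int) (r : List (Int × Int))
    (h : pvGood s r) (hp : s.2.2.2 = 1 ∨ s.2.2.2 = 2) :
    max s.1 (2 * min s.2.1 s.2.2.1) = (r.reverse.foldl pvScan (0, none)).1 := by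
  obtain ⟨m, t, e, p⟩ := s
  obtain ⟨l, rest, hr, h1, h2, hl, hhl, hfold, hm⟩ := h
  subst hr
  simp only at h1 h2 hp hfold hm ⊢
  rw [List.reverse_cons, List.foldl_append, hfold]
  cases rest with
  | nil =>
    simp only [List.head?, Option.map, List.foldl_cons, List.foldl_nil, pvScan]
    rcases hp with hp | hp <;> subst hp <;> simp_all [pvHeadLen] <;> omega
  | cons hd tl =>
    obtain ⟨hv, hlh⟩ := hd
    simp only [List.head?, Option.map, List.foldl_cons, List.foldl_nil, pvScan]
    rcases hp with hp | hp <;> subst hp <;> simp_all [pvHeadLen] <;> omega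

-- ===== VERDICT (by name: the statement is the Claim_ definition above) =====
theorem longest_sushi_segment_spec : Claim_equal_longest_sushi_segment := by
  intro n st _ hpre
  obtain ⟨hne, hlen, hall⟩ := hpre
  have hmem : ∀ i : Int, 0 ≤ i → i < n →
      PySem.List.pyGetD st i 0 = 1 ∨ PySem.List.pyGetD st i 0 = 2 := by
    intro i h0 hi
    have hidx : i.toNat < st.length := by omega
    have hget : PySem.List.pyGetD st i 0 = st[i.toNat] := by
      simp [PySem.List.pyGetD, PySem.List.pyGet?, PySem.List.pyIdx?, h0,
        show i < (st.length : Int) by omega, List.getElem?_eq_getElem hidx]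
    have htk : st[i.toNat] ∈ st.take n.toNat := by
      rw [List.mem_take_iff_getElem]
      exact ⟨i.toNat, by omega, rfl⟩
    have := List.all_eq_true.mp hall _ htk
    rw [hget]; revert this
    by_cases e1 : st[i.toNat] = 1 <;> by_cases e2 : st[i.toNat] = 2 <;> simp_all
  cases st with
  | nil => exact absurd rfl hne
  | cons h0 tl =>
    show longest_sushi_segment n (h0 :: tl) = longest_sushi_segment_alt n (h0 :: tl)
    unfold longest_sushi_segment longest_sushi_segment_alt
    rw [PySem.List.pyGet?_zero_cons]
    by_cases hn : n ≤ 0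
    · rw [PySem.List.pyRange_one_eq_nil hn]
      simp
    · rw [PySem.List.pyRange_one_cons (by omega : (0:Int) < n)]
      simp only [List.foldl_cons]
      have hg0 : PySem.List.pyGetD (h0 :: tl) 0 0 = h0 := by
        simp [PySem.List.pyGetD, PySem.List.pyGet?, PySem.List.pyIdx?]
      have h0v : h0 = 1 ∨ h0 = 2 := by simpa [hg0] using hmem 0 le_rfl (by omega)
      rw [hg0, show (0:Int) + 1 = 1 from by norm_num]
      have hpv : (pvStepA (0, 0, 0, h0) h0).2.2.2 = 1 ∨ (pvStepA (0, 0, 0, h0) h0).2.2.2 = 2 := by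
        rcases h0v with hv | hv <;> subst hv <;> simp [pvStepA]
      have hgood := pvGood_fold (h0 :: tl) n hmem (n - 1).toNat 1 (by omega) (by omega)
        _ _ (pvGood_base h0 h0v) hpv
      have hpv' := pvFold_prev (h0 :: tl) n hmem (n - 1).toNat 1 (by omega) (by omega)
        _ hpv
      exact pvFinal _ _ hgood hpv'
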